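-- pv_equiv track=rewrite | github.com/jonathanc1699/ATC-NER | NER training scripts/prepare_data.py | tag_items
-- ===== SOURCE A (Python) =====
-- def tag_items(tag, phrase, id):
--     HEADER = "B-{}".format(tag)
--     TRAILER = "L-{}".format(tag)
--     MIDDLE = "I-{}".format(tag)
--     SINGLE = "U-{}".format(tag)
--
--     words = [x.lower() for x in phrase.split()]
--
--     if tag == "O":
--         return [[x, "O"] for x in words]
--
--     if len(words) == 0:
--         return [[x, "O"] for x in words]
--
--     if len(words) == 1:
--         return [
--             [id, words[0], SINGLE],
--         ]
--
--     if len(words) == 2: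
--         return [[id, words[0], HEADER], [id, words[1], TRAILER]]
--
--     intermediaries = [[id, x, MIDDLE] for x in words[1:-1]]
--
--     result = []
--     result.extend(
--         [
--             [id, words[0], HEADER],
--         ]
--     )
--     result.extend(intermediaries)
--     result.extend(
--         [
--             [id, words[-1], TRAILER],
--         ]
--     )
--
--     return result
-- ===== SOURCE B (Python) =====
-- def _label(tag, n, i):
--     if n == 1:
--         return "U-" + tag
--     if i == 0:
--         return "B-" + tag
--     if i == n - 1:
--         return "L-" + tag
--     return "I-" + tag
--
--
-- def tag_items(tag, phrase, id):
--     words = [w.lower() for w in phrase.split()]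
--     if tag == "O" or not words:
--         return [[w, "O"] for w in words]
--     n = len(words)
--     return [[id, w, _label(tag, n, i)] for i, w in enumerate(words)]
-- ===== Notes on version B (the rewrite author's own statement) =====
-- stated objective: simpler
-- what changed: Replaced the len==0/1/2/>=3 return ladder with slicing and extend by a single pass over enumerate(words) that derives each word's BILOU label from its index (U if one word, B at 0, L at the end, I inside), keeping the O/empty 2-element-row case.
import Mathlib
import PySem

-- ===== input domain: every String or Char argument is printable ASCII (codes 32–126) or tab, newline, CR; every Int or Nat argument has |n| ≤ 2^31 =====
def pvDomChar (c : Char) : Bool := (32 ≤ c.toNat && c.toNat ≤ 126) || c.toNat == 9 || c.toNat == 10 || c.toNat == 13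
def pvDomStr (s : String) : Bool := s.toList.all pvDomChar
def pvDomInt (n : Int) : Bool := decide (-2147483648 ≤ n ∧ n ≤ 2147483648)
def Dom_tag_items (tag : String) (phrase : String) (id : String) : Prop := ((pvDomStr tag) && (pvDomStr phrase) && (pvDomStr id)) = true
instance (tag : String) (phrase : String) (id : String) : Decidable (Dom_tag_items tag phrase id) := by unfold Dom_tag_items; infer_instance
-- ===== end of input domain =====

-- B replaces A's length-case ladder by one index-driven labelling pass (simpler decomposition).

-- ===== PORT A =====
def tag_items (tag : String) (phrase : String) (id : String) : List (List String) :=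
  let HEADER := "B-" ++ tag
  let TRAILER := "L-" ++ tag
  let MIDDLE := "I-" ++ tag
  let SINGLE := "U-" ++ tag
  let words := (PySem.Str.split₀ phrase).map PySem.Str.lower
  if tag == "O" then words.map (fun x => [x, "O"])
  else if words.length == 0 then words.map (fun x => [x, "O"])
  else if words.length == 1 then [[id, PySem.List.pyGetD words 0 "", SINGLE]]
  else if words.length == 2 then
    [[id, PySem.List.pyGetD words 0 "", HEADER], [id, PySem.List.pyGetD words 1 "", TRAILER]]
  else
    let intermediaries := (PySem.List.slice words (some 1) (some (-1))).map (fun x => [id, x, MIDDLE])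
    [[id, PySem.List.pyGetD words 0 "", HEADER]] ++ intermediaries
      ++ [[id, PySem.List.pyGetD words (-1) "", TRAILER]]

-- ===== PORT B =====
def pvLabel (tag : String) (n : Nat) (i : Int) : String :=
  if n == 1 then "U-" ++ tag
  else if i == 0 then "B-" ++ tag
  else if i == (n : Int) - 1 then "L-" ++ tag
  else "I-" ++ tag

def tag_items_alt (tag : String) (phrase : String) (id : String) : List (List String) :=
  let words := (PySem.Str.split₀ phrase).map PySem.Str.lower
  if tag == "O" || words.length == 0 then words.map (fun w => [w, "O"])
  else (PySem.List.enumerate words 0).map (fun p => [id, p.2, pvLabel tag words.length p.1])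

-- ===== PRECONDITION & SPEC =====
def Spec_tag_items (tag : String) (phrase : String) (id : String) (out : List (List String)) : Prop := out = tag_items_alt tag phrase id
instance (tag : String) (phrase : String) (id : String) (out : List (List String)) : Decidable (Spec_tag_items tag phrase id out) := by unfold Spec_tag_items; infer_instance

-- ===== CLAIM (what is proved, stated in full; the proofs are below) =====
def Claim_equal_tag_items : Prop := ∀ (tag : String) (phrase : String) (id : String), Dom_tag_items tag phrase id → Spec_tag_items tag phrase id (tag_items tag phrase id)

-- ===== LEMMAS AND PROOFS =====

-- the tail of the ≥3-word case: indices k ≥ 1 over r ++ [z], last index is n-1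
theorem pv_tail_lemma (tag id z : String) (n : Nat) :
    ∀ (r : List String) (k : Int), 1 ≤ k → 2 ≤ n → k + r.length + 1 = (n : Int) →
    (PySem.List.enumerate (r ++ [z]) k).map (fun p => [id, p.2, pvLabel tag n p.1]) =
      r.map (fun x => [id, x, "I-" ++ tag]) ++ [[id, z, "L-" ++ tag]] := by
  intro r
  induction r with
  | nil =>
    intro k h1 h2 h3
    simp only [List.nil_append, PySem.List.enumerate_cons, PySem.List.enumerate_nil,
      List.map_cons, List.map_nil, pvLabel]
    have hn : ¬ n = 1 := by omega
    have hk0 : ¬ k = 0 := by omega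
    have hl : k = (n:Int) - 1 := by simp at h3; omega
    simp [hn, hl]
    omega
  | cons x t ih =>
    intro k h1 h2 h3
    rw [List.cons_append, PySem.List.enumerate_cons]
    simp only [List.map_cons, List.cons_append]
    rw [ih (k+1) (by omega) h2 (by simp at h3 ⊢; omega)]
    have hlab : pvLabel tag n k = "I-" ++ tag := by
      unfold pvLabel
      have : ¬ (n == 1) = true := by simp; omega
      have hk : ¬ (k == 0) = true := by simp; omega
      have hl : ¬ (k == (n:Int) - 1) = true := by simp at h3 ⊢; omega
      simp [this, hk, hl]
    rw [hlab]


-- slice ws[1:-1] on a nonempty list is tail.dropLast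
theorem pv_slice_mid (x : String) (xs : List String) :
    PySem.List.slice (x :: xs) (some 1) (some (-1)) = xs.dropLast := by
  simp [PySem.List.slice, List.dropLast_eq_take]

-- the two bodies agree for every word list
theorem pv_core (tag id : String) (ws : List String) :
    (if tag == "O" then ws.map (fun x => [x, "O"])
     else if ws.length == 0 then ws.map (fun x => [x, "O"])
     else if ws.length == 1 then [[id, PySem.List.pyGetD ws 0 "", "U-" ++ tag]]
     else if ws.length == 2 then
       [[id, PySem.List.pyGetD ws 0 "", "B-" ++ tag], [id, PySem.List.pyGetD ws 1 "", "L-" ++ tag]]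
     else
       [[id, PySem.List.pyGetD ws 0 "", "B-" ++ tag]]
         ++ (PySem.List.slice ws (some 1) (some (-1))).map (fun x => [id, x, "I-" ++ tag])
         ++ [[id, PySem.List.pyGetD ws (-1) "", "L-" ++ tag]]) =
    (if tag == "O" || ws.length == 0 then ws.map (fun w => [w, "O"])
     else (PySem.List.enumerate ws 0).map (fun p => [id, p.2, pvLabel tag ws.length p.1])) := by
  cases hO : (tag == "O") with
  | true => simp
  | false =>
    simp only [Bool.false_or, Bool.false_eq_true, if_false]
    match ws with
    | [] => simp
    | [a] =>
      simp only [List.length_singleton, PySem.List.enumerate_cons, PySem.List.enumerate_nil,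
        List.map_cons, List.map_nil]
      have : PySem.List.pyGetD [a] (0 : Int) "" = a := by simp [PySem.List.pyGetD_ofNat']
      simp [this, pvLabel]
    | [a, b] =>
      have g0 : PySem.List.pyGetD [a, b] (0 : Int) "" = a := by simp [PySem.List.pyGetD_ofNat']
      have g1 : PySem.List.pyGetD [a, b] (1 : Int) "" = b := by simp [PySem.List.pyGetD_ofNat']
      simp only [List.length_cons, List.length_nil, PySem.List.enumerate_cons,
        PySem.List.enumerate_nil, List.map_cons, List.map_nil, g0, g1]
      have l0 : pvLabel tag 2 0 = "B-" ++ tag := by simp [pvLabel]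
      have l1 : pvLabel tag 2 1 = "L-" ++ tag := by simp [pvLabel]
      simp [l0, l1]
    | a :: b :: c :: t =>
      have h0 : ¬ ((a :: b :: c :: t).length == 0) = true := by simp
      have h1 : ¬ ((a :: b :: c :: t).length == 1) = true := by simp
      have h2 : ¬ ((a :: b :: c :: t).length == 2) = true := by simp
      rw [if_neg (by simpa using h0), if_neg h0, if_neg h1, if_neg h2]
      rcases List.eq_nil_or_concat (b :: c :: t) with h | ⟨r, z, hrz⟩
      · exact absurd h (by simp)
      · rw [show (a :: b :: c :: t) = a :: (r ++ [z]) from by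
          rw [hrz, List.concat_eq_append]]
        have hlen : (a :: (r ++ [z])).length = r.length + 2 := by simp
        rw [PySem.List.enumerate_cons, List.map_cons]
        simp only [zero_add]
        have hB : pvLabel tag (a :: (r ++ [z])).length 0 = "B-" ++ tag := by
          unfold pvLabel
          have hne : ¬ ((a :: (r ++ [z])).length == 1) = true := by
            simp [hlen]
          simp
        rw [hB]
        rw [pv_tail_lemma tag id z (a :: (r ++ [z])).length r 1 le_rfl
          (by rw [hlen]; omega) (by rw [hlen]; push_cast; ring)]
        rw [pv_slice_mid]
        have gz : PySem.List.pyGetD (a :: (r ++ [z])) (-1 : Int) "" = z := by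
          have h' : PySem.List.pyGetD ((a :: r) ++ [z]) (-1 : Int) "" = z := by simp [pysem]
          simpa using h'
        have ga : PySem.List.pyGetD (a :: (r ++ [z])) (0 : Int) "" = a := by
          simp [PySem.List.pyGetD_ofNat']
        rw [gz, ga]
        simp

-- ===== VERDICT (by name: the statement is the Claim_ definition above) =====
theorem tag_items_spec : Claim_equal_tag_items := by
  intro tag phrase id _
  unfold Spec_tag_items tag_items tag_items_alt
  exact pv_core tag id ((PySem.Str.split₀ phrase).map PySem.Str.lower)
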